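-- pv_equiv track=rewrite | github.com/JZembower/ECG-Image-Diagnostic-App | training-pipeline/kaggle_train.py | extract_primary_label
-- ===== SOURCE A (Python) =====
-- CLASS_MAPPING = {
--     'NORM': 'Normal',
--     'MI': 'Myocardial Infarction',
--     'STTC': 'ST/T Change',
--     'CD': 'Conduction Disturbance',
--     'HYP': 'Hypertrophy',
--     'AFIB': 'Atrial Fibrillation',
--     'LAFB': 'Left Anterior Fascicular Block',
--     'LPFB': 'Left Posterior Fascicular Block',
--     'RBBB': 'Right Bundle Branch Block',
--     'LBBB': 'Left Bundle Branch Block',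
--     'WPW': 'Wolff-Parkinson-White',
--     'PVC': 'Premature Ventricular Contraction',
--     'PACE': 'Pacemaker',
--     'IVCD': 'Intraventricular Conduction Delay'
-- }
--
-- def extract_primary_label(scp_dict):
--     """Extract primary diagnostic label from SCP codes"""
--     if not scp_dict:
--         return 'NORM'
--
--     # Get all codes with confidence >= 50%
--     valid_codes = [code for code, conf in scp_dict.items() if conf >= 50]
--
--     # Priority-based selection for multi-label cases
--     for code in CLASS_MAPPING.keys():
--         if code in valid_codes:
--             return code
--
--     return 'NORM'  # Default to normal if no match
-- ===== SOURCE B (Python) =====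
-- PRIORITY = ['NORM', 'MI', 'STTC', 'CD', 'HYP', 'AFIB', 'LAFB', 'LPFB',
--             'RBBB', 'LBBB', 'WPW', 'PVC', 'PACE', 'IVCD']
--
-- RANK = {code: i for i, code in enumerate(PRIORITY)}
--
-- def extract_primary_label(scp_dict):
--     """Extract primary diagnostic label from SCP codes (single pass, rank table)"""
--     if not scp_dict:
--         return 'NORM'
--     best = None
--     best_rank = None
--     for code, conf in scp_dict.items():
--         if conf >= 50:
--             r = RANK.get(code)
--             if r is not None and (best_rank is None or r < best_rank):
--                 best, best_rank = code, r
--     return best if best is not None else 'NORM'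
-- ===== Notes on version B (the rewrite author's own statement) =====
-- stated objective: alternative
-- what changed: Replaces the filtered valid-codes list plus a second scan over CLASS_MAPPING with a precomputed rank table and a single pass over the items keeping the running best-priority code.
import Mathlib
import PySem

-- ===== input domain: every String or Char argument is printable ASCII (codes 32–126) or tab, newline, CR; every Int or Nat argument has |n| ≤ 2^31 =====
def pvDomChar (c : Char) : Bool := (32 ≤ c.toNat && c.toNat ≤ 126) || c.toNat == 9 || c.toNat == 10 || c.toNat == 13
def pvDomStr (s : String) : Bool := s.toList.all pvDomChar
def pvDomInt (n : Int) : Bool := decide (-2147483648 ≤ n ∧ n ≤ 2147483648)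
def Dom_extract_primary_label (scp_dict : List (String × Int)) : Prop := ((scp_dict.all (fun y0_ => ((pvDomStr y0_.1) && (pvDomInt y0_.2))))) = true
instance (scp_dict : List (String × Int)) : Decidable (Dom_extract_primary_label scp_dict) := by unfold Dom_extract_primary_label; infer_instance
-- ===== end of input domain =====

-- B replaces A's filtered valid-codes list plus a second scan of CLASS_MAPPING by a precomputed
-- rank table and ONE pass over the items keeping the running best-priority code (objective: alternative).

-- ===== PORT A =====
def classMapping : List (String × String) :=
  [("NORM", "Normal"), ("MI", "Myocardial Infarction"), ("STTC", "ST/T Change"),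
   ("CD", "Conduction Disturbance"), ("HYP", "Hypertrophy"), ("AFIB", "Atrial Fibrillation"),
   ("LAFB", "Left Anterior Fascicular Block"), ("LPFB", "Left Posterior Fascicular Block"),
   ("RBBB", "Right Bundle Branch Block"), ("LBBB", "Left Bundle Branch Block"),
   ("WPW", "Wolff-Parkinson-White"), ("PVC", "Premature Ventricular Contraction"),
   ("PACE", "Pacemaker"), ("IVCD", "Intraventricular Conduction Delay")]

def extract_primary_label (scp_dict : List (String × Int)) : String :=
  let items := (PySem.Dict.ofList scp_dict).items
  if items = [] then "NORM"
  else
    let valid_codes := (items.filter (fun p => 50 ≤ p.2)).map Prod.fst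
    match (classMapping.map Prod.fst).find? (fun code => valid_codes.contains code) with
    | some code => code
    | none => "NORM"

-- ===== PORT B =====
def priorityList : List String :=
  ["NORM", "MI", "STTC", "CD", "HYP", "AFIB", "LAFB", "LPFB",
   "RBBB", "LBBB", "WPW", "PVC", "PACE", "IVCD"]

-- RANK = {code: i for i, code in enumerate(PRIORITY)}
def rankDict : PySem.Dict String Int :=
  (PySem.List.enumerate priorityList 0).foldl
    (fun d p => d.insert p.2 p.1) PySem.Dict.empty

-- the body of B's loop (conf >= 50, rank lookup, keep smaller rank)
def pvStep (acc : Option (String × Int)) (p : String × Int) : Option (String × Int) :=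
  if 50 ≤ p.2 then
    match rankDict.get? p.1 with
    | some r =>
      match acc with
      | none => some (p.1, r)
      | some (_, r0) => if r < r0 then some (p.1, r) else acc
    | none => acc
  else acc

def extract_primary_label_alt (scp_dict : List (String × Int)) : String :=
  let items := (PySem.Dict.ofList scp_dict).items
  if items = [] then "NORM"
  else
    match items.foldl pvStep none with
    | some (best, _) => best
    | none => "NORM"

-- ===== PRECONDITION & SPEC =====
def Spec_extract_primary_label (scp_dict : List (String × Int)) (out : String) : Prop := out = extract_primary_label_alt scp_dict
instance (scp_dict : List (String × Int)) (out : String) : Decidable (Spec_extract_primary_label scp_dict out) := by unfold Spec_extract_primary_label; infer_instance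

-- ===== CLAIM (what is proved, stated in full; the proofs are below) =====
def Claim_equal_extract_primary_label : Prop := ∀ (scp_dict : List (String × Int)), Dom_extract_primary_label scp_dict → Spec_extract_primary_label scp_dict (extract_primary_label scp_dict)

-- ===== LEMMAS AND PROOFS =====

-- left-biased "min by rank" combination of two loop states
def pvMerge (a b : Option (String × Int)) : Option (String × Int) :=
  match a with
  | none => b
  | some (_, r) =>
    match b with
    | none => a
    | some (_, r') => if r' < r then b else a

-- position of a in ks (first occurrence), carrying a and its index offset by i
def pvMk (ks : List String) (i : Int) (a : String) : Option (String × Int) :=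
  match ks with
  | [] => none
  | k :: t => if k == a then some (a, i) else pvMk t (i + 1) a

-- first element of ks satisfying p, with its index offset by i
def pvEfind (ks : List String) (i : Int) (p : String → Bool) : Option (String × Int) :=
  match ks with
  | [] => none
  | k :: t => if p k then some (k, i) else pvEfind t (i + 1) p

theorem pvEfind_ge (ks : List String) (i : Int) (p : String → Bool) (q : String × Int)
    (h : pvEfind ks i p = some q) : i ≤ q.2 := by
  induction ks generalizing i with
  | nil => simp [pvEfind] at h
  | cons k t ih =>
    simp only [pvEfind] at h
    split at h
    · cases h; simp
    · have := ih (i + 1) h; omega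

theorem pvEfind_congr (ks : List String) (i : Int) (p q : String → Bool)
    (h : ∀ k, p k = q k) : pvEfind ks i p = pvEfind ks i q := by
  induction ks generalizing i with
  | nil => rfl
  | cons k t ih => simp only [pvEfind, h, ih]

theorem pvMerge_assoc (a b c : Option (String × Int)) :
    pvMerge (pvMerge a b) c = pvMerge a (pvMerge b c) := by
  rcases a with _ | ⟨ca, ra⟩ <;> rcases b with _ | ⟨cb, rb⟩ <;> rcases c with _ | ⟨cc, rc⟩ <;>
    simp only [pvMerge] <;> split_ifs <;> (try simp only [pvMerge]) <;>
    (try split_ifs) <;> first | rfl | omega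

theorem pvStep_eq (acc : Option (String × Int)) (p : String × Int) :
    pvStep acc p = pvMerge acc (pvStep none p) := by
  rcases acc with _ | ⟨c0, r0⟩
  · rfl
  · simp only [pvStep]
    split_ifs with h
    · rcases hg : rankDict.get? p.1 with _ | r <;> simp only [pvMerge]
    · rfl

theorem pvFoldl_merge (l : List (String × Int)) (acc : Option (String × Int)) :
    l.foldl pvStep acc = pvMerge acc (l.foldl pvStep none) := by
  induction l generalizing acc with
  | nil => cases acc <;> rfl
  | cons x t ih =>
    simp only [List.foldl_cons]
    rw [ih (pvStep acc x), ih (pvStep none x), pvStep_eq acc x, pvMerge_assoc]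

theorem pvMk_ge (ks : List String) (i : Int) (a : String) (q : String × Int)
    (h : pvMk ks i a = some q) : i ≤ q.2 := by
  induction ks generalizing i with
  | nil => simp [pvMk] at h
  | cons k t ih =>
    simp only [pvMk] at h
    split at h
    · cases h; simp
    · have := ih (i + 1) h; omega

theorem pvMk_fst (ks : List String) (i : Int) (a : String) (q : String × Int)
    (h : pvMk ks i a = some q) : q.1 = a := by
  induction ks generalizing i with
  | nil => simp [pvMk] at h
  | cons k t ih =>
    simp only [pvMk] at h
    split at h
    · cases h; rfl
    · exact ih (i + 1) h

theorem pvMk_merge_efind (ks : List String) (i : Int) (a : String) (p : String → Bool) :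
    pvMerge (pvMk ks i a) (pvEfind ks i p) = pvEfind ks i (fun k => k == a || p k) := by
  induction ks generalizing i with
  | nil => rfl
  | cons k t ih =>
    by_cases hk : k = a
    · subst hk
      by_cases hp : p k = true
      · simp [pvMk, pvEfind, hp, pvMerge]
      · simp only [pvMk, pvEfind, BEq.rfl, Bool.true_or, if_true,
          hp, if_false, Bool.false_eq_true]
        rcases he : pvEfind t (i + 1) p with _ | q
        · rfl
        · have := pvEfind_ge _ _ _ _ he
          simp only [pvMerge]
          rw [if_neg (by omega)]
    · have hba : (k == a) = false := by simp [hk]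
      by_cases hp : p k = true
      · simp only [pvMk, pvEfind, hba, Bool.false_or, hp, if_true, Bool.false_eq_true, if_false]
        rcases hm : pvMk t (i + 1) a with _ | q
        · rfl
        · have := pvMk_ge _ _ _ _ hm
          simp only [pvMerge]
          rw [if_pos (by omega)]
      · simp only [pvMk, pvEfind, hba, Bool.false_or, hp, if_false, Bool.false_eq_true]
        exact ih (i + 1)

-- ks paired with indices i, i+1, …
def pvPairs (ks : List String) (i : Int) : List (String × Int) :=
  match ks with
  | [] => []
  | k :: t => (k, i) :: pvPairs t (i + 1)

theorem pvRank_gen (ks : List String) (i : Int) (c : String) :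
    (PySem.Dict.mk (pvPairs ks i)).get? c = (pvMk ks i c).map Prod.snd := by
  induction ks generalizing i with
  | nil => rfl
  | cons k t ih =>
    simp only [pvPairs, pvMk, PySem.Dict.get?_mk_cons]
    by_cases h : (k == c) = true <;> simp [h, ih (i + 1)]

theorem pvRank_eq (c : String) :
    rankDict.get? c = (pvMk priorityList 0 c).map Prod.snd := by
  have h : rankDict = PySem.Dict.mk (pvPairs priorityList 0) := by decide
  rw [h, pvRank_gen]

theorem pvStep_none (p : String × Int) :
    pvStep none p = if 50 ≤ p.2 then pvMk priorityList 0 p.1 else none := by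
  simp only [pvStep, pvRank_eq]
  split_ifs with h
  · rcases hm : pvMk priorityList 0 p.1 with _ | ⟨c, r⟩
    · rfl
    · have hc : c = p.1 := pvMk_fst _ _ _ _ hm
      simp [hc]
  · rfl

theorem pvFind?_eq_efind (ks : List String) (i : Int) (p : String → Bool) :
    ks.find? p = (pvEfind ks i p).map Prod.fst := by
  induction ks generalizing i with
  | nil => rfl
  | cons k t ih =>
    simp only [List.find?, pvEfind]
    split_ifs with h <;> simp [h, ih (i + 1)]

theorem pvMain (l : List (String × Int)) :
    l.foldl pvStep none =
      pvEfind priorityList 0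
        (fun k => ((l.filter (fun p => 50 ≤ p.2)).map Prod.fst).contains k) := by
  induction l with
  | nil =>
    simp only [List.filter_nil, List.map_nil]
    decide
  | cons x t ih =>
    simp only [List.foldl_cons]
    rw [pvFoldl_merge, ih, pvStep_none]
    split_ifs with h
    · rw [pvMk_merge_efind]
      apply pvEfind_congr
      intro k
      simp [h]
    · rw [pvMerge]
      apply pvEfind_congr
      intro k
      simp [h]

-- ===== VERDICT (by name: the statement is the Claim_ definition above) =====
theorem extract_primary_label_spec : Claim_equal_extract_primary_label := by
  intro scp_dict _
  unfold Spec_extract_primary_label extract_primary_label extract_primary_label_alt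
  simp only
  generalize (PySem.Dict.ofList scp_dict).items = m
  split_ifs with h
  · rfl
  · have hk : classMapping.map Prod.fst = priorityList := by decide
    rw [hk, pvFind?_eq_efind _ 0, ← pvMain]
    rcases hf : m.foldl pvStep none with _ | ⟨c, r⟩ <;> simp
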